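-- pv_equiv track=rewrite | github.com/JamesPImes/AoC_Solutions | 2020/aoc2020_24.py | conway_round
-- ===== SOURCE A (Python) =====
-- DIRECTS = {
--         'se': lambda x, y: (x + 1, y - 1),
--         'sw': lambda x, y: (x - 1, y - 1),
--         'ne': lambda x, y: (x + 1, y + 1),
--         'nw': lambda x, y: (x - 1, y + 1),
--         'e': lambda x, y: (x + 2, y),
--         'w': lambda x, y: (x - 2, y)
--     }
--
-- def conway_round(cells: dict):
--     new_round = {}
--
--     def count_adjacent(x, y):
--         total_black = 0
--         for func in DIRECTS.values():
--             adj_coord = func(x, y)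
--             total_black += cells.get(adj_coord, 0)
--         return total_black
--
--     # Expand our known hex-grid by 1 tile in all directions (as needed),
--     # for each outer tile that is black.
--     to_add = set()
--     for c, v in cells.items():
--         if v == 0:
--             # Don't expand if this tile is white (a modest optimization
--             # that is legal for our specific Conway ruleset due to the
--             # fact that white tiles surrounded by only white tiles won't
--             # change).
--             continue
--         x, y = c
--         for func in DIRECTS.values():
--             adj_coord = func(x, y)
--             to_add.add(adj_coord)
--     for adj_coord in to_add:
--         cells.setdefault(adj_coord, 0)
--
--     # Apply our Conway rules to each cell.
--     for c, v in cells.items():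
--         x, y = c
--         black_count = count_adjacent(x, y)
--         if v == 0 and black_count == 2:
--             v = 1
--         elif v == 1 and black_count not in [1, 2]:
--             v = 0
--         new_round[c] = v
--
--     return new_round
-- ===== SOURCE B (Python) =====
-- # Scatter/append round: accumulate neighbour counts around black tiles, apply the
-- # rule in one pass over the existing cells, then append newly-born cells from the
-- # counts dict. Unlike A, B does NOT mutate its `cells` argument; the equivalence
-- # is about the return value.
-- OFFSETS = [(1, -1), (-1, -1), (1, 1), (-1, 1), (2, 0), (-2, 0)]
--
-- def conway_round(cells: dict):
--     counts = {}
--     for (x, y), v in cells.items():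
--         if v != 0:
--             for dx, dy in OFFSETS:
--                 n = (x + dx, y + dy)
--                 counts[n] = counts.get(n, 0) + v
--     new_round = {}
--     for c, v in cells.items():
--         bc = counts.get(c, 0)
--         new_round[c] = 1 if (v == 0 and bc == 2) else (0 if (v == 1 and bc not in (1, 2)) else v)
--     for n, bc in counts.items():
--         if n not in cells:
--             new_round[n] = 1 if bc == 2 else 0
--     return new_round
-- ===== Notes on version B (the rewrite author's own statement) =====
-- stated objective: alternative
-- what changed: A expands the grid by mutating cells with setdefault and then gathers each cell's black-neighbour count with 6 dict lookups per cell; B never mutates cells: it scatters each black tile's value into a counts dict keyed by its 6 neighbours, applies the rule to the existing cells with one counts lookup each, and appends the newly-born cells (counts keys absent from cells, black iff count==2) in a second pass over counts. A mutates its argument, B does not; the claim is about the return value.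
import Mathlib
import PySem

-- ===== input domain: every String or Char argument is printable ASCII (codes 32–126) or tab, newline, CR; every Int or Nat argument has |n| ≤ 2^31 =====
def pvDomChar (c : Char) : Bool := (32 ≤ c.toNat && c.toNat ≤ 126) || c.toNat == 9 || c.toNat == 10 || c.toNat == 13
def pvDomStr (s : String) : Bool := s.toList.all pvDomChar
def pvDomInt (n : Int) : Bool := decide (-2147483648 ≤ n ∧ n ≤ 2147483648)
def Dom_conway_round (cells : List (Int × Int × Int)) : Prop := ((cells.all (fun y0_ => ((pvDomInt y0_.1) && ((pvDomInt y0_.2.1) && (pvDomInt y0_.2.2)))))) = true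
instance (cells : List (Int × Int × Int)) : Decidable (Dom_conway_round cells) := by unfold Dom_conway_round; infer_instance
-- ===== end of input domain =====

-- B replaces A's expand-with-setdefault + per-cell 6-neighbour gather with a scatter of
-- counts around black tiles, one rule pass over the existing cells, and an append pass
-- for newly-born cells. A mutates its `cells` argument (setdefault), B does not; the
-- equivalence proved here is about the RETURN value.

-- ===== PORT A =====
def pvDirectsA : List (Int × Int) := [(1,-1),(-1,-1),(1,1),(-1,1),(2,0),(-2,0)]

-- A's Conway rule (the if/elif chain of A's final loop)
def pvRule (v bc : Int) : Int :=
  if v == 0 && bc == 2 then 1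
  else if v == 1 && !(bc == 1 || bc == 2) then 0
  else v

-- A's count_adjacent helper: sum of the 6 neighbours' values
def pvCountAdjacent (cells : PySem.Dict (Int × Int) Int) (x y : Int) : Int :=
  pvDirectsA.foldl (fun total e => total + cells.getD (x + e.1, y + e.2) 0) 0

-- A's to_add loop: collect the neighbours of every non-white tile into a set
def pvToAdd (l : List ((Int × Int) × Int)) (s : PySem.Set (Int × Int)) : PySem.Set (Int × Int) :=
  l.foldl (fun s p =>
    if p.2 == 0 then s
    else pvDirectsA.foldl (fun s e => PySem.Set.add s (p.1.1 + e.1, p.1.2 + e.2)) s) s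

def conway_round (cells : List (Int × Int × Int)) : List (Int × Int × Int) :=
  let d : PySem.Dict (Int × Int) Int :=
    PySem.Dict.ofList (cells.map (fun t => ((t.1, t.2.1), t.2.2)))
  let to_add := pvToAdd d.items PySem.Set.empty
  let d2 := to_add.foldl (fun c k => c.setdefault k 0) d
  let new_round := d2.items.foldl
    (fun nr p => nr.insert p.1 (pvRule p.2 (pvCountAdjacent d2 p.1.1 p.1.2)))
    PySem.Dict.empty
  new_round.items.map (fun p => (p.1.1, p.1.2, p.2))

-- ===== PORT B =====
def pvOffsetsB : List (Int × Int) := [(1,-1),(-1,-1),(1,1),(-1,1),(2,0),(-2,0)]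

-- B's scatter loop: for every non-white tile, add its value to each neighbour's count
def pvScatter (l : List ((Int × Int) × Int)) (cnt : PySem.Dict (Int × Int) Int) :
    PySem.Dict (Int × Int) Int :=
  l.foldl (fun cnt p =>
    if p.2 == 0 then cnt
    else pvOffsetsB.foldl (fun cnt e =>
      cnt.insert (p.1.1 + e.1, p.1.2 + e.2) (cnt.getD (p.1.1 + e.1, p.1.2 + e.2) 0 + p.2)) cnt) cnt

def conway_round_alt (cells : List (Int × Int × Int)) : List (Int × Int × Int) :=
  let d : PySem.Dict (Int × Int) Int :=
    PySem.Dict.ofList (cells.map (fun t => ((t.1, t.2.1), t.2.2)))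
  let counts := pvScatter d.items PySem.Dict.empty
  -- rule pass over the existing cells (B's second loop, bc bound once)
  let base := d.items.foldl
    (fun nr p =>
      let bc := counts.getD p.1 0
      nr.insert p.1
        (if p.2 == 0 && bc == 2 then 1
         else if p.2 == 1 && !(bc == 1 || bc == 2) then 0
         else p.2))
    PySem.Dict.empty
  -- append pass: newly-born cells among the counted neighbours (B's third loop)
  let new_round := counts.items.foldl
    (fun nr q => if d.contains q.1 then nr else nr.insert q.1 (if q.2 == 2 then 1 else 0))
    base
  new_round.items.map (fun p => (p.1.1, p.1.2, p.2))

-- ===== PRECONDITION & SPEC =====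
def Spec_conway_round (cells : List (Int × Int × Int)) (out : List (Int × Int × Int)) : Prop := out = conway_round_alt cells
instance (cells : List (Int × Int × Int)) (out : List (Int × Int × Int)) : Decidable (Spec_conway_round cells out) := by unfold Spec_conway_round; infer_instance

-- ===== CLAIM =====
def Claim_equal_conway_round : Prop := ∀ (cells : List (Int × Int × Int)), Dom_conway_round cells → Spec_conway_round cells (conway_round cells)

-- ===== LEMMAS AND PROOFS =====

theorem pvDirects_eq : pvDirectsA = pvOffsetsB := rfl

-- membership in the translated offset list
theorem pv_mem_map_key (c : Int × Int) (x y : Int) :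
    (c ∈ pvOffsetsB.map (fun e => (x + e.1, y + e.2))) ↔
      (c.1 - x, c.2 - y) ∈ pvOffsetsB := by
  obtain ⟨a, b⟩ := c
  simp [pvOffsetsB, Prod.ext_iff]
  omega

-- the 6 offsets are closed under negation
theorem pv_offs_symm (a b : Int) : ((a, b) ∈ pvOffsetsB) ↔ ((-a, -b) ∈ pvOffsetsB) := by
  simp [pvOffsetsB, Prod.ext_iff]
  omega

theorem pv_nodup_map_key (x y : Int) :
    (pvOffsetsB.map (fun e => (x + e.1, y + e.2))).Nodup := by
  simp [pvOffsetsB, Prod.ext_iff]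

-- value of a fold of "insert k (getD k 0 + v)" over a duplicate-free key list
theorem pv_insertAdd_getD (ks : List (Int × Int)) (hnd : ks.Nodup)
    (d : PySem.Dict (Int × Int) Int) (c : Int × Int) (v : Int) :
    (ks.foldl (fun d k => d.insert k (d.getD k 0 + v)) d).getD c 0 =
      d.getD c 0 + (if c ∈ ks then v else 0) := by
  induction ks generalizing d with
  | nil => simp
  | cons k ks ih =>
    obtain ⟨hk, hnd'⟩ := List.nodup_cons.mp hnd
    simp only [List.foldl_cons]
    rw [ih hnd']
    rw [PySem.Dict.getD_insert]
    by_cases hc : c = k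
    · subst hc
      simp [hk]
    · simp [hc, List.mem_cons]

-- counts.getD c 0  =  Σ over items of (value if the item is a neighbour of c)
theorem pv_scatter_getD (l : List ((Int × Int) × Int)) (cnt : PySem.Dict (Int × Int) Int)
    (c : Int × Int) :
    (pvScatter l cnt).getD c 0 =
      cnt.getD c 0 +
        (l.map (fun p => if (c.1 - p.1.1, c.2 - p.1.2) ∈ pvOffsetsB then p.2 else 0)).sum := by
  induction l generalizing cnt with
  | nil => simp [pvScatter]
  | cons p l ih =>
    simp only [pvScatter, List.foldl_cons] at ih ⊢
    by_cases hp : p.2 = 0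
    · rw [if_pos (show (p.2 == 0) = true by simpa using hp)]
      rw [ih]
      simp [hp]
    · rw [if_neg (show ¬ ((p.2 == 0) = true) by simpa using hp)]
      rw [ih]
      rw [show (List.foldl (fun cnt e =>
              cnt.insert (p.1.1 + e.1, p.1.2 + e.2) (cnt.getD (p.1.1 + e.1, p.1.2 + e.2) 0 + p.2))
              cnt pvOffsetsB)
            = List.foldl (fun d k => d.insert k (d.getD k 0 + p.2)) cnt
                (pvOffsetsB.map (fun e => (p.1.1 + e.1, p.1.2 + e.2))) from
            by rw [List.foldl_map]]
      rw [pv_insertAdd_getD _ (pv_nodup_map_key p.1.1 p.1.2)]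
      simp only [pv_mem_map_key, List.map_cons, List.sum_cons]
      ring

-- B's counts dict has exactly A's to_add set as its key list
theorem pv_scatter_keys (l : List ((Int × Int) × Int)) (cnt : PySem.Dict (Int × Int) Int) :
    (pvScatter l cnt).keys = pvToAdd l cnt.keys := by
  induction l generalizing cnt with
  | nil => rfl
  | cons p l ih =>
    simp only [pvScatter, pvToAdd, List.foldl_cons] at ih ⊢
    by_cases hp : p.2 = 0
    · rw [if_pos (show (p.2 == 0) = true by simpa using hp),
          if_pos (show (p.2 == 0) = true by simpa using hp)]
      exact ih cnt
    · rw [if_neg (show ¬ ((p.2 == 0) = true) by simpa using hp),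
          if_neg (show ¬ ((p.2 == 0) = true) by simpa using hp)]
      rw [ih]
      congr 1
      rw [show (List.foldl (fun cnt e =>
              cnt.insert (p.1.1 + e.1, p.1.2 + e.2) (cnt.getD (p.1.1 + e.1, p.1.2 + e.2) 0 + p.2))
              cnt pvOffsetsB).keys
            = PySem.Set.update cnt.keys (pvOffsetsB.map (fun e => (p.1.1 + e.1, p.1.2 + e.2))) from
            PySem.Dict.keys_foldl_insert_key pvOffsetsB _ _ cnt]
      rw [PySem.Set.update_map_eq_foldl_add]
      rfl

-- scatter keeps dict keys duplicate-free
theorem pv_scatter_nodup (l : List ((Int × Int) × Int)) (cnt : PySem.Dict (Int × Int) Int)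
    (h : cnt.keys.Nodup) : (pvScatter l cnt).keys.Nodup := by
  induction l generalizing cnt with
  | nil => exact h
  | cons p l ih =>
    simp only [pvScatter, List.foldl_cons] at ih ⊢
    by_cases hp : p.2 = 0
    · rw [if_pos (show (p.2 == 0) = true by simpa using hp)]
      exact ih cnt h
    · rw [if_neg (show ¬ ((p.2 == 0) = true) by simpa using hp)]
      exact ih _ (PySem.Dict.nodup_keys_foldl_insert_key pvOffsetsB _ _ cnt h)

-- setdefault with default 0 never changes a getD-with-0 lookup
theorem pv_setdefault_getD (ks : List (Int × Int)) (d : PySem.Dict (Int × Int) Int)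
    (c : Int × Int) :
    (ks.foldl (fun c k => c.setdefault k 0) d).getD c 0 = d.getD c 0 := by
  induction ks generalizing d with
  | nil => rfl
  | cons k ks ih =>
    simp only [List.foldl_cons]
    rw [ih]
    by_cases h : d.contains k
    · rw [PySem.Dict.setdefault_of_contains d 0 h]
    · rw [PySem.Dict.setdefault_of_not_contains d 0 (by simpa using h)]
      rw [PySem.Dict.getD_insert]
      by_cases hc : c = k
      · subst hc
        rw [if_pos rfl]; exact (PySem.Dict.getD_of_not_contains d 0 (by simpa using h)).symm
      · rw [if_neg hc]

-- A's setdefault loop appends exactly the fresh keys, value 0, in order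
theorem pv_setdefault_items (ks : List (Int × Int)) (hnd : ks.Nodup)
    (d : PySem.Dict (Int × Int) Int) :
    (ks.foldl (fun c k => c.setdefault k 0) d).items =
      d.items ++ (ks.filter (fun k => !(d.contains k))).map (fun k => (k, (0 : Int))) := by
  induction ks generalizing d with
  | nil => simp
  | cons k ks ih =>
    obtain ⟨hk, hnd'⟩ := List.nodup_cons.mp hnd
    simp only [List.foldl_cons, List.filter_cons]
    by_cases h : d.contains k
    · rw [PySem.Dict.setdefault_of_contains d 0 h, ih hnd' d]
      simp [h]
    · have hnc : d.contains k = false := by simpa using h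
      rw [PySem.Dict.setdefault_of_not_contains d 0 hnc, ih hnd' (d.insert k 0),
          PySem.Dict.items_insert_of_not_contains d 0 hnc]
      rw [List.filter_congr (l := ks)
            (q := fun k' => !(d.contains k'))
            (fun k' hk' => by
              rw [PySem.Dict.contains_insert]
              have hne : (k' == k) = false :=
                beq_eq_false_iff_ne.mpr (fun he => hk (he ▸ hk'))
              rw [hne, Bool.false_or])]
      simp [hnc]

-- a fold that skips on a condition is a fold over the filtered list
theorem pv_foldl_skip {α β : Type} (l : List α) (P : α → Bool) (step : β → α → β) (b : β) :
    l.foldl (fun acc x => if P x then acc else step acc x) b =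
      (l.filter (fun x => !(P x))).foldl step b := by
  induction l generalizing b with
  | nil => rfl
  | cons x l ih =>
    simp only [List.foldl_cons, List.filter_cons]
    by_cases h : P x
    · simp [h, ih]
    · simp [h, ih]

-- the rule on a fresh white cell
theorem pvRule_zero (bc : Int) : pvRule 0 bc = if bc == 2 then 1 else 0 := by
  simp [pvRule]

theorem pv_sum_zero (l : List ((Int × Int) × Int)) (k : Int × Int)
    (h : k ∉ l.map Prod.fst) :
    (l.map (fun p => if p.1 = k then p.2 else 0)).sum = 0 := by
  apply List.sum_eq_zero
  intro x hx
  obtain ⟨p, hp, rfl⟩ := List.mem_map.mp hx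
  rw [if_neg]
  intro he
  exact h (List.mem_map.mpr ⟨p, hp, he⟩)

-- a dict lookup (default 0) as a sum over its items, given duplicate-free keys
theorem pv_getD_eq_sum (d : PySem.Dict (Int × Int) Int) (hnd : d.keys.Nodup) (k : Int × Int) :
    d.getD k 0 = (d.items.map (fun p => if p.1 = k then p.2 else 0)).sum := by
  obtain ⟨l⟩ := d
  simp only [PySem.Dict.keys] at hnd
  induction l with
  | nil => simp [PySem.Dict.getD, PySem.Dict.get?]
  | cons p l ih =>
    simp only [List.map_cons, List.nodup_cons] at hnd
    obtain ⟨hk, hnd'⟩ := hnd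
    rw [PySem.Dict.getD_eq_get?_getD, PySem.Dict.get?_mk_cons]
    by_cases hc : p.1 = k
    · rw [if_pos (by simpa using hc)]
      simp only [List.map_cons, List.sum_cons, if_pos hc, Option.getD_some]
      rw [pv_sum_zero l k (hc ▸ hk)]
      ring
    · rw [if_neg (by simpa using hc)]
      rw [← PySem.Dict.getD_eq_get?_getD]
      rw [ih hnd']
      simp [hc]

-- a single item's contribution to the 6-lookup gather
theorem pv_sum_ite_six (x y : Int) (c : Int × Int) (v : Int) :
    (pvOffsetsB.map (fun e => if c = (x + e.1, y + e.2) then v else 0)).sum =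
      if (c.1 - x, c.2 - y) ∈ pvOffsetsB then v else 0 := by
  obtain ⟨a, b⟩ := c
  simp [pvOffsetsB, Prod.ext_iff]
  split_ifs <;> omega

-- exchange the two sums of the gather
theorem pv_swap (l : List ((Int × Int) × Int)) (x y : Int) :
    (pvOffsetsB.map (fun e =>
        (l.map (fun p => if p.1 = (x + e.1, y + e.2) then p.2 else 0)).sum)).sum =
      (l.map (fun p => if (p.1.1 - x, p.1.2 - y) ∈ pvOffsetsB then p.2 else 0)).sum := by
  induction l with
  | nil => simp
  | cons q l ih =>
    simp only [List.map_cons, List.sum_cons]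
    rw [PySem.List.sum_map_add_int pvOffsetsB
          (fun e => if q.1 = (x + e.1, y + e.2) then q.2 else 0)
          (fun e => (l.map (fun p => if p.1 = (x + e.1, y + e.2) then p.2 else 0)).sum)]
    rw [ih, pv_sum_ite_six]

-- A's gather as a sum over the dict's items
theorem pv_gather_sum (d : PySem.Dict (Int × Int) Int) (hnd : d.keys.Nodup) (x y : Int) :
    pvCountAdjacent d x y =
      (d.items.map (fun p => if (p.1.1 - x, p.1.2 - y) ∈ pvOffsetsB then p.2 else 0)).sum := by
  rw [pvCountAdjacent, pvDirects_eq]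
  rw [PySem.List.foldl_add pvOffsetsB (fun e => d.getD (x + e.1, y + e.2) 0) 0]
  rw [List.map_congr_left (fun e _ => pv_getD_eq_sum d hnd (x + e.1, y + e.2))]
  rw [pv_swap]
  ring

-- the hex-neighbour relation is symmetric
theorem pv_flip (c k : Int × Int) (v : Int) :
    (if (k.1 - c.1, k.2 - c.2) ∈ pvOffsetsB then v else 0) =
      (if (c.1 - k.1, c.2 - k.2) ∈ pvOffsetsB then v else 0) := by
  have h := pv_offs_symm (k.1 - c.1) (k.2 - c.2)
  simp only [show -(k.1 - c.1) = c.1 - k.1 from by ring,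
             show -(k.2 - c.2) = c.2 - k.2 from by ring] at h
  exact if_congr h rfl rfl

-- A's gather on the setdefault-extended dict equals B's counts lookup
theorem pv_count_eq (d : PySem.Dict (Int × Int) Int) (hnd : d.keys.Nodup)
    (ks : List (Int × Int)) (x y : Int) :
    pvCountAdjacent (ks.foldl (fun c k => c.setdefault k 0) d) x y =
      (pvScatter d.items PySem.Dict.empty).getD (x, y) 0 := by
  have h1 : pvCountAdjacent (ks.foldl (fun c k => c.setdefault k 0) d) x y
      = pvCountAdjacent d x y := by
    rw [pvCountAdjacent, pvCountAdjacent]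
    exact PySem.List.foldl_congr_mem _ _ _ _
      (fun acc e _ => by rw [pv_setdefault_getD])
  rw [h1, pv_gather_sum d hnd x y, pv_scatter_getD d.items PySem.Dict.empty (x, y),
      PySem.Dict.getD_empty]
  simp only [zero_add]
  congr 1
  exact List.map_congr_left (fun p _ => pv_flip (x, y) p.1 p.2)

-- second segment: A's fold over the appended fresh pairs = B's skip-fold over counts
theorem pv_seg2 (d : PySem.Dict (Int × Int) Int) (hnd : d.keys.Nodup)
    (b0 : PySem.Dict (Int × Int) Int) :
    ((pvToAdd d.items PySem.Set.empty).filter (fun k => !(d.contains k))).foldl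
        (fun nr k => nr.insert k (pvRule 0
          (pvCountAdjacent ((pvToAdd d.items PySem.Set.empty).foldl
            (fun c k => c.setdefault k 0) d) k.1 k.2))) b0
    = (pvScatter d.items PySem.Dict.empty).items.foldl
        (fun nr q => if d.contains q.1 then nr else nr.insert q.1 (if q.2 == 2 then 1 else 0))
        b0 := by
  have hcnd : (pvScatter d.items PySem.Dict.empty).keys.Nodup :=
    pv_scatter_nodup _ _ (by simp)
  rw [pv_foldl_skip (pvScatter d.items PySem.Dict.empty).items (fun q => d.contains q.1)]
  rw [PySem.Dict.items_eq_map_keys (pvScatter d.items PySem.Dict.empty) hcnd 0]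
  rw [List.filter_map]
  rw [List.filter_congr (l := (pvScatter d.items PySem.Dict.empty).keys)
        (p := (fun x => !(d.contains x.1)) ∘
          (fun k => (k, (pvScatter d.items PySem.Dict.empty).getD k 0)))
        (q := fun k => !(d.contains k)) (fun k _ => rfl)]
  rw [List.foldl_map]
  have hkeys : (pvScatter d.items PySem.Dict.empty).keys = pvToAdd d.items PySem.Set.empty := by
    rw [pv_scatter_keys, PySem.Dict.keys_empty]
    rfl
  rw [hkeys]
  apply PySem.List.foldl_congr_mem
  intro nr k _
  show nr.insert k (pvRule 0
      (pvCountAdjacent ((pvToAdd d.items PySem.Set.empty).foldl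
        (fun c k => c.setdefault k 0) d) k.1 k.2))
    = nr.insert k (if (pvScatter d.items PySem.Dict.empty).getD k 0 == 2 then 1 else 0)
  rw [pv_count_eq d hnd (pvToAdd d.items PySem.Set.empty) k.1 k.2, pvRule_zero]

-- the whole round after building the dict, for any dict with duplicate-free keys
theorem pv_main_d (d : PySem.Dict (Int × Int) Int) (hnd : d.keys.Nodup) :
    ((pvToAdd d.items PySem.Set.empty).foldl (fun c k => c.setdefault k 0) d).items.foldl
        (fun nr p => nr.insert p.1 (pvRule p.2
          (pvCountAdjacent ((pvToAdd d.items PySem.Set.empty).foldl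
            (fun c k => c.setdefault k 0) d) p.1.1 p.1.2)))
        PySem.Dict.empty
    = (pvScatter d.items PySem.Dict.empty).items.foldl
        (fun nr q => if d.contains q.1 then nr
          else nr.insert q.1 (if q.2 == 2 then 1 else 0))
        (d.items.foldl
          (fun nr p => nr.insert p.1
            (if p.2 == 0 && (pvScatter d.items PySem.Dict.empty).getD p.1 0 == 2 then 1
             else if p.2 == 1 && !((pvScatter d.items PySem.Dict.empty).getD p.1 0 == 1 ||
                 (pvScatter d.items PySem.Dict.empty).getD p.1 0 == 2) then 0
             else p.2))
          PySem.Dict.empty) := by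
  have hta : (pvToAdd d.items PySem.Set.empty).Nodup := by
    have h := pv_scatter_nodup d.items PySem.Dict.empty (by simp)
    rw [pv_scatter_keys, PySem.Dict.keys_empty] at h
    exact h
  rw [pv_setdefault_items _ hta d, List.foldl_append]
  have h1 : d.items.foldl
      (fun nr p => nr.insert p.1 (pvRule p.2
        (pvCountAdjacent ((pvToAdd d.items PySem.Set.empty).foldl
          (fun c k => c.setdefault k 0) d) p.1.1 p.1.2)))
      PySem.Dict.empty
    = d.items.foldl
        (fun nr p => nr.insert p.1
          (if p.2 == 0 && (pvScatter d.items PySem.Dict.empty).getD p.1 0 == 2 then 1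
           else if p.2 == 1 && !((pvScatter d.items PySem.Dict.empty).getD p.1 0 == 1 ||
               (pvScatter d.items PySem.Dict.empty).getD p.1 0 == 2) then 0
           else p.2))
        PySem.Dict.empty := by
    apply PySem.List.foldl_congr_mem
    intro nr p _
    rw [show p.1 = (p.1.1, p.1.2) from rfl,
        pv_count_eq d hnd (pvToAdd d.items PySem.Set.empty) p.1.1 p.1.2]
    rfl
  rw [h1, List.foldl_map]
  exact pv_seg2 d hnd _

theorem pv_main (cells : List (Int × Int × Int)) :
    conway_round cells = conway_round_alt cells := by
  simp only [conway_round, conway_round_alt]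
  rw [pv_main_d (PySem.Dict.ofList (cells.map (fun t => ((t.1, t.2.1), t.2.2))))
        (PySem.Dict.nodup_keys_ofList _)]

-- ===== VERDICT =====
theorem conway_round_spec : Claim_equal_conway_round := by
  intro cells _
  unfold Spec_conway_round
  exact pv_main cells
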